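-- pv_equiv track=rewrite | github.com/wyk18703232953/myResearch | codeComplex/data/filteredData/python/logn/python_logn_0660.py | search
-- ===== SOURCE A (Python) =====
-- def fn(n):
--     return (n * (n + 1)) // 2
--
-- def search(x, n):
--     left, right = 0, n
--     while left <= right:
--         middle = left + (right - left) // 2
--         value = fn(middle) - (n - middle)
--         if value == x:
--             return n - middle
--         elif value > x:
--             right = middle - 1
--         else:
--             left = middle + 1
--     return -1
-- ===== SOURCE B (Python) =====
-- def _isqrt(a):
--     if a == 0:
--         return 0
--     x = a
--     y = (x + a // x) // 2
--     while y < x: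
--         x = y
--         y = (x + a // x) // 2
--     return x
--
-- def search(x, n):
--     # value(m) = m*(m+1)//2 - (n - m) = x  <=>  m*m + 3*m = 2*(n + x)
--     t = 9 + 8 * (n + x)
--     if t < 0:
--         return -1
--     r = _isqrt(t)
--     if r * r != t:
--         return -1
--     m = (r - 3) // 2
--     if 0 <= m <= n:
--         return n - m
--     return -1
-- ===== Notes on version B (the rewrite author's own statement) =====
-- stated objective: alternative
-- what changed: Replaced the binary search over [0, n] by solving the quadratic m*m + 3*m = 2*(n + x) in closed form with a hand-written Newton integer square root, checking the discriminant is a perfect square and the root lies in [0, n].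
import Mathlib
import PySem

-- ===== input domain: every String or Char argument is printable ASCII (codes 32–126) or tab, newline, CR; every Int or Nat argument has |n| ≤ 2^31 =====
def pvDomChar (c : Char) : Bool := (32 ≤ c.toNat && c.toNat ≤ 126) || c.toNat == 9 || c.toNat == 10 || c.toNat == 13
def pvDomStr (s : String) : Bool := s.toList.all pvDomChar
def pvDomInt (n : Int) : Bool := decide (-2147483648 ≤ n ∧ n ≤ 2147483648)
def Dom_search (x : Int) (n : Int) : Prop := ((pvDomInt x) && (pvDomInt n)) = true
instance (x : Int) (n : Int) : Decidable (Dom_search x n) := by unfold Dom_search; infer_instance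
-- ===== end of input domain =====

-- B replaces A's binary search over [0, n] by solving the quadratic m*m + 3*m = 2*(n + x)
-- in closed form: a Newton integer square root of the discriminant, a perfect-square check,
-- and a range check of the root.

-- ===== PORT A =====
def fnA (n : Int) : Int := PySem.Int.floordiv (n * (n + 1)) 2

-- the while loop, with a fuel bound ≥ the interval length (the loop shrinks the
-- interval each iteration, so the fuel is never exhausted before `left > right`)
def searchLoop (x : Int) (n : Int) : Nat → Int → Int → Int
  | 0, _, _ => -1
  | fuel + 1, left, right =>
    if left ≤ right then
      let middle := left + PySem.Int.floordiv (right - left) 2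
      let value := fnA middle - (n - middle)
      if value = x then n - middle
      else if value > x then searchLoop x n fuel left (middle - 1)
      else searchLoop x n fuel (middle + 1) right
    else -1

def search (x : Int) (n : Int) : Int := searchLoop x n (n + 1).toNat 0 n

-- ===== PORT B =====
-- `_isqrt`'s Newton loop, with a fuel bound ≥ the iteration count (x strictly decreases)
def isqrtAux (a : Nat) : Nat → Nat → Nat
  | 0, x => x
  | fuel + 1, x =>
    let y := (x + a / x) / 2
    if y < x then isqrtAux a fuel y else x

def isqrtN (a : Nat) : Nat := if a = 0 then 0 else isqrtAux a a a

-- the straight-line body of B's `search`, one helper per local binding (t, r, m)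
def checkRange (n : Int) (m : Int) : Int :=
  if 0 ≤ m ∧ m ≤ n then n - m else -1

def checkRoot (n : Int) (t : Int) (r : Int) : Int :=
  if r * r = t then checkRange n (PySem.Int.floordiv (r - 3) 2) else -1

def checkDisc (n : Int) (t : Int) : Int :=
  if t < 0 then -1 else checkRoot n t ((isqrtN t.toNat : Nat) : Int)

def search_alt (x : Int) (n : Int) : Int :=
  checkDisc n (9 + 8 * (n + x))

-- ===== PRECONDITION & SPEC =====
def Spec_search (x : Int) (n : Int) (out : Int) : Prop := out = search_alt x n
instance (x : Int) (n : Int) (out : Int) : Decidable (Spec_search x n out) := by unfold Spec_search; infer_instance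

-- ===== CLAIM (what is proved, stated in full; the proofs are below) =====
def Claim_equal_search : Prop := ∀ (x : Int) (n : Int), Dom_search x n → Spec_search x n (search x n)

-- ===== LEMMAS AND PROOFS =====

lemma two_mul_fnA (m : Int) : 2 * fnA m = m * (m + 1) := by
  have he : 2 ∣ m * (m + 1) := Int.even_mul_succ_self m |>.two_dvd
  have := PySem.Int.floordiv_eq_ediv_of_pos (a := m * (m + 1)) (b := 2) (by omega)
  simp only [fnA, this]
  omega

/-- the probed quantity `fn(m) - (n - m)` is strictly increasing in `m` on `m ≥ 0`. -/
lemma value_strictMono {n a b : Int} (ha : 0 ≤ a) (hab : a < b) :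
    fnA a - (n - a) < fnA b - (n - b) := by
  have h1 := two_mul_fnA a
  have h2 := two_mul_fnA b
  nlinarith

lemma isqrtAux_eq (a s : Nat) (hs1 : s * s ≤ a) (hs2 : a < (s + 1) * (s + 1)) (hs : 1 ≤ s) :
    ∀ (fuel x : Nat), s ≤ x → x ≤ s + fuel → isqrtAux a fuel x = s := by
  intro fuel
  induction fuel with
  | zero =>
    intro x h1 h2
    have hxe : x = s := by omega
    rw [isqrtAux, hxe]
  | succ fuel ih =>
    intro x h1 h2
    have hx0 : 0 < x := by omega
    rw [isqrtAux]
    set y := (x + a / x) / 2 with hy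
    have hkey : s ≤ y := by
      by_cases hcase : x ≤ 2 * s
      · have hz : (x : ℤ) * (2 * s - x) ≤ (s : ℤ) * s := by nlinarith [sq_nonneg ((x : ℤ) - s)]
        have hzn : (2 * s - x) * x ≤ s * s := by
          have hcast : ((2 * s - x : Nat) : ℤ) = 2 * (s : ℤ) - x := by omega
          have : ((2 * s - x : Nat) : ℤ) * (x : ℤ) ≤ (s : ℤ) * s := by rw [hcast]; nlinarith
          exact_mod_cast this
        have hdiv : 2 * s - x ≤ a / x :=
          (Nat.le_div_iff_mul_le hx0).mpr (le_trans hzn hs1)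
        omega
      · have : 0 ≤ a / x := Nat.zero_le _
        omega
    by_cases hlt : y < x
    · rw [if_pos hlt]
      exact ih y hkey (by omega)
    · rw [if_neg hlt]
      by_contra hne
      have hxs : s + 1 ≤ x := by omega
      have hdiv : a / x ≤ s := by
        have hlt' : a < (s + 1) * x := lt_of_lt_of_le hs2 (Nat.mul_le_mul_left _ hxs)
        have := (Nat.div_lt_iff_lt_mul hx0).mpr hlt'
        omega
      omega

lemma isqrtN_sqrt (a : Nat) (ha : 1 ≤ a) : isqrtN a = Nat.sqrt a := by
  have h1 : Nat.sqrt a * Nat.sqrt a ≤ a := by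
    have := Nat.sqrt_le' a; nlinarith
  have h2 : a < (Nat.sqrt a + 1) * (Nat.sqrt a + 1) := by
    have := Nat.lt_succ_sqrt' a; nlinarith
  have hs : 1 ≤ Nat.sqrt a := by
    by_contra h
    have : Nat.sqrt a = 0 := by omega
    rw [this] at h2; omega
  have hle : Nat.sqrt a ≤ a := Nat.sqrt_le_self a
  rw [isqrtN, if_neg (by omega)]
  exact isqrtAux_eq a _ h1 h2 hs a a hle (by omega)

/-- if `m` in `[0, n]` matches then B returns `n - m`. -/
lemma alt_found (x n m : Int) (h0 : 0 ≤ m) (h1 : m ≤ n) (hx : fnA m - (n - m) = x) :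
    search_alt x n = n - m := by
  have h2m := two_mul_fnA m
  have ht : (9 : Int) + 8 * (n + x) = (2 * m + 3) * (2 * m + 3) := by linear_combination -8 * hx + 4 * h2m
  rw [search_alt, checkDisc, if_neg (by rw [ht]; exact not_lt.mpr (mul_self_nonneg _))]
  set M := (2 * m + 3).toNat with hMdef
  have hM : (M : ℤ) = 2 * m + 3 := Int.toNat_of_nonneg (by omega)
  have hteq : (9 + 8 * (n + x)).toNat = M * M := by
    rw [ht, show (2 * m + 3) * (2 * m + 3) = ((M * M : Nat) : ℤ) by push_cast [hM]; ring]
    exact Int.toNat_natCast _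
  have hM3 : 3 ≤ M := by omega
  have hsq : Nat.sqrt (M * M) = M := by rw [← pow_two]; exact Nat.sqrt_eq' M
  rw [hteq, isqrtN_sqrt (M * M) (by nlinarith), hsq]
  rw [checkRoot, if_pos (by rw [hM, ← ht])]
  have hfd := PySem.Int.floordiv_eq_ediv_of_pos (a := (M : ℤ) - 3) (b := 2) (by omega)
  have hmm : PySem.Int.floordiv ((M : ℤ) - 3) 2 = m := by rw [hfd, hM]; omega
  rw [hmm, checkRange, if_pos ⟨h0, h1⟩]

/-- if no `m` in `[0, n]` matches then B returns `-1`. -/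
lemma alt_none (x n : Int) (hnone : ∀ m, 0 ≤ m → m ≤ n → fnA m - (n - m) ≠ x) :
    search_alt x n = -1 := by
  rw [search_alt, checkDisc]
  by_cases hneg : 9 + 8 * (n + x) < 0
  · rw [if_pos hneg]
  · rw [if_neg hneg]
    set r : Int := ((isqrtN (9 + 8 * (n + x)).toNat : Nat) : Int) with hr
    rw [checkRoot]
    by_cases hrr : r * r = 9 + 8 * (n + x)
    · rw [if_pos hrr, checkRange]
      set m := PySem.Int.floordiv (r - 3) 2 with hm
      by_cases hmb : 0 ≤ m ∧ m ≤ n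
      · exfalso
        have hodd : r % 2 = 1 := by
          rcases Int.even_or_odd r with he | ho
          · exfalso
            have : Even (r * r) := he.mul_right r
            rw [hrr, Int.even_iff] at this
            omega
          · exact Int.odd_iff.mp ho
        have hfd := PySem.Int.floordiv_eq_ediv_of_pos (a := r - 3) (b := 2) (by omega)
        have hm' : r = 2 * m + 3 := by rw [hm, hfd]; omega
        rw [hm'] at hrr
        have h2m := two_mul_fnA m
        have h4 : 4 * (m * m) + 12 * m = 8 * (n + x) := by linear_combination hrr
        have h2 : 2 * fnA m = m * m + m := by linear_combination h2m
        have hmatch : fnA m - (n - m) = x := by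
          generalize m * m = P at h4 h2
          omega
        exact hnone m hmb.1 hmb.2 hmatch
      · rw [if_neg hmb]
    · rw [if_neg hrr]

lemma searchLoop_found (x n : Int) :
    ∀ (k : Nat) (left right m : Int), (right - left + 1).toNat ≤ k →
      0 ≤ left → right ≤ n → left ≤ m → m ≤ right → fnA m - (n - m) = x →
      searchLoop x n k left right = n - m := by
  intro k
  induction k with
  | zero => intro left right m hk _ _ h1 h2 _; omega
  | succ k ih =>
    intro left right m hk hl hr h1 h2 hx
    have hlr : left ≤ right := le_trans h1 h2
    have hfd := PySem.Int.floordiv_eq_ediv_of_pos (a := right - left) (b := 2) (by omega)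
    rw [searchLoop]
    simp only [hlr, if_true]
    set middle := left + PySem.Int.floordiv (right - left) 2 with hmid
    have hmb : left ≤ middle ∧ middle ≤ right := by rw [hmid, hfd]; omega
    by_cases hc1 : fnA middle - (n - middle) = x
    · -- `middle` matches; by strict monotonicity `middle = m`
      have hmem : middle = m := by
        rcases lt_trichotomy middle m with h | h | h
        · have := value_strictMono (n := n) (by omega) h; omega
        · exact h
        · have := value_strictMono (n := n) (by omega : (0:Int) ≤ m) h; omega
      subst hmem
      simp [hc1]
    · simp only [hc1, if_false]
      by_cases hc2 : fnA middle - (n - middle) > x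
      · -- value > x: the match lies strictly below middle
        have hm_lt : m < middle := by
          by_contra h
          push_neg at h
          rcases eq_or_lt_of_le h with h' | h'
          · exact hc1 (h' ▸ hx)
          · have := value_strictMono (n := n) (by omega) h'; omega
        simp only [hc2, if_true]
        exact ih left (middle - 1) m (by rw [hmid, hfd]; omega) hl (by omega) h1 (by omega) hx
      · have hm_gt : middle < m := by
          by_contra h
          push_neg at h
          rcases eq_or_lt_of_le h with h' | h'
          · exact hc1 (h' ▸ hx)
          · have := value_strictMono (n := n) (by omega : (0:Int) ≤ m) h'; omega
        simp only [hc2, if_false]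
        exact ih (middle + 1) right m (by rw [hmid, hfd]; omega) (by omega) hr (by omega) h2 hx

lemma searchLoop_none (x n : Int) :
    ∀ (k : Nat) (left right : Int), (right - left + 1).toNat ≤ k → 0 ≤ left → right ≤ n →
      (∀ m, left ≤ m → m ≤ right → fnA m - (n - m) ≠ x) →
      searchLoop x n k left right = -1 := by
  intro k
  induction k with
  | zero => intro left right _ _ _ _; rfl
  | succ k ih =>
    intro left right hk hl hr hnone
    by_cases hlr : left ≤ right
    · have hfd := PySem.Int.floordiv_eq_ediv_of_pos (a := right - left) (b := 2) (by omega)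
      rw [searchLoop]
      simp only [hlr, if_true]
      set middle := left + PySem.Int.floordiv (right - left) 2 with hmid
      have hmb : left ≤ middle ∧ middle ≤ right := by rw [hmid, hfd]; omega
      have hne : ¬ (fnA middle - (n - middle) = x) := hnone middle hmb.1 hmb.2
      simp only [hne, if_false]
      by_cases hc2 : fnA middle - (n - middle) > x
      · simp only [hc2, if_true]
        exact ih left (middle - 1) (by rw [hmid, hfd]; omega) hl (by omega)
          (fun m ha hb => hnone m ha (by omega))
      · simp only [hc2, if_false]
        exact ih (middle + 1) right (by rw [hmid, hfd]; omega) (by omega) hr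
          (fun m ha hb => hnone m (by omega) hb)
    · rw [searchLoop]
      simp only [hlr, if_false]

-- ===== VERDICT (by name: the statement is the Claim_ definition above) =====
theorem search_spec : Claim_equal_search := by
  intro x n _
  unfold Spec_search search
  by_cases hex : ∃ m, 0 ≤ m ∧ m ≤ n ∧ fnA m - (n - m) = x
  · obtain ⟨m, h0, h1, h2⟩ := hex
    rw [searchLoop_found x n (n + 1).toNat 0 n m (by omega) le_rfl le_rfl h0 h1 h2,
        alt_found x n m h0 h1 h2]
  · push_neg at hex
    rw [searchLoop_none x n (n + 1).toNat 0 n (by omega) le_rfl le_rfl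
          (fun m h1 h2 => hex m h1 h2),
        alt_none x n (fun m h1 h2 => hex m h1 h2)]
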